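-- pv_equiv track=rewrite | github.com/981377660LMT/algorithm-study | 22_专题/前缀与差分/前缀和/3729. 统计有序数组中可被 K 整除的子数组数量-和可被K整除的本质不同子数组个数.py | numGoodSubarrays
-- ===== SOURCE A (Python) =====
-- from typing import List
-- from collections import defaultdict
--
-- def numGoodSubarrays(nums: List[int], k: int) -> int:
--     counter = defaultdict(int)
--     counter[0] = 1
--     presum = 0
--     res = 0
--     ptr = 0
--     for i, x in enumerate(nums):
--         if i and x != nums[i - 1]:
--             v = nums[i - 1]
--             s = presum
--             for _ in range(i - ptr):
--                 counter[s % k] += 1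
--                 s -= v
--             ptr = i
--         presum += x
--         res += counter[presum % k]
--     return res
-- ===== SOURCE B (Python) =====
-- from typing import List
--
-- def numGoodSubarrays(nums: List[int], k: int) -> int:
--     # run-length encode nums, then process each run in two explicit phases
--     runs = []
--     cur = 0
--     cnt = 0
--     for x in nums:
--         if cnt and x == cur:
--             cnt += 1
--         else:
--             if cnt:
--                 runs.append((cur, cnt))
--             cur = x
--             cnt = 1
--     if cnt:
--         runs.append((cur, cnt))
--     counter = {0: 1}
--     presum = 0
--     res = 0
--     nruns = len(runs)
--     for j in range(nruns):
--         v, length = runs[j]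
--         mods = []
--         for _ in range(length):
--             presum += v
--             m = presum % k
--             res += counter.get(m, 0)
--             mods.append(m)
--         if j + 1 < nruns:  # the last run's prefixes are never added (as in the task)
--             for m in mods:
--                 counter[m] = counter.get(m, 0) + 1
--     return res
-- ===== Notes on version B (the rewrite author's own statement) =====
-- stated objective: alternative
-- what changed: A's single loop with a ptr and a deferred inner flush loop is replaced by an explicit run-length encoding of nums followed by a per-run two-phase loop (walk the run adding counter hits, then publish the run's prefix remainders unless it is the last run).
import Mathlib
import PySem

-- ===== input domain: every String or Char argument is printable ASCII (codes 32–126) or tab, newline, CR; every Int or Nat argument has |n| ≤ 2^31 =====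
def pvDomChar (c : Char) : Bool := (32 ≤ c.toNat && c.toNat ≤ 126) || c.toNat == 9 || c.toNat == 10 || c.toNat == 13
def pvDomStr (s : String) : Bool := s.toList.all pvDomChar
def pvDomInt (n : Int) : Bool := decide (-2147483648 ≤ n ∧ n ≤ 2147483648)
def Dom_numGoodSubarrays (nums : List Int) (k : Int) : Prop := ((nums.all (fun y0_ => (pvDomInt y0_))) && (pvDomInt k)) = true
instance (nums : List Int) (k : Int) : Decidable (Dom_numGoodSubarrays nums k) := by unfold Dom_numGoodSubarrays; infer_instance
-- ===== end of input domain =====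

-- B replaces A's pointer-and-deferred-inner-loop with an explicit run-length decomposition
-- processed run by run in two phases (walk, then publish the run's prefix remainders);
-- objective: alternative decomposition of the same O(n) computation.


-- ===== PORT A =====

-- counter[key] += 1 on a defaultdict(int)   (same line occurs in both Pythons)
def bump (c : PySem.Dict Int Int) (key : Int) : PySem.Dict Int Int :=
  c.insert key (c.getD key 0 + 1)

-- one iteration of A's inner loop:  counter[s % k] += 1; s -= v
def flushStep (k v : Int) (cs : PySem.Dict Int Int × Int) (_ : Nat) : PySem.Dict Int Int × Int :=
  (bump cs.1 (PySem.Int.mod cs.2 k), cs.2 - v)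

-- the body of A's 'for i, x in enumerate(nums)' loop; state = (counter, presum, res, ptr)
def stepA (nums : List Int) (k : Int) (st : PySem.Dict Int Int × Int × Int × Int)
    (ix : Int × Int) : PySem.Dict Int Int × Int × Int × Int :=
  match st, ix with
  | (c, presum, res, ptr), (i, x) =>
    -- nums[i-1]: whenever the branch is taken, 1 ≤ i ≤ len(nums)-1, so the index is in range
    let cp :=
      if i ≠ 0 ∧ x ≠ PySem.List.pyGetD nums (i - 1) 0 then
        let v := PySem.List.pyGetD nums (i - 1) 0
        let cs := (List.range (i - ptr).toNat).foldl (flushStep k v) (c, presum)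
        (cs.1, i)
      else (c, ptr)
    let presum' := presum + x
    (cp.1, presum', res + cp.1.getD (PySem.Int.mod presum' k) 0, cp.2)

def numGoodSubarrays (nums : List Int) (k : Int) : Int :=
  ((PySem.List.enumerate nums 0).foldl (stepA nums k)
    (PySem.Dict.empty.insert 0 1, 0, 0, 0)).2.2.1

-- ===== PORT B =====

-- body of B's run-building loop; state = (runs, cur, cnt)
def runStepB (st : List (Int × Int) × Int × Int) (x : Int) : List (Int × Int) × Int × Int :=
  match st with
  | (runs, cur, cnt) =>
    if cnt ≠ 0 ∧ x = cur then (runs, cur, cnt + 1)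
    else ((if cnt ≠ 0 then runs ++ [(cur, cnt)] else runs), x, 1)

def runsB (nums : List Int) : List (Int × Int) :=
  let st := nums.foldl runStepB ([], 0, 0)
  if st.2.2 ≠ 0 then st.1 ++ [(st.2.1, st.2.2)] else st.1

-- one walk step inside a run:  presum += v; res += counter.get(presum % k, 0); mods.append(...)
def walkStep (k v : Int) (c : PySem.Dict Int Int) (st : Int × Int × List Int) (_ : Nat) :
    Int × Int × List Int :=
  match st with
  | (presum, res, mods) =>
    let presum' := presum + v
    let m := PySem.Int.mod presum' k
    (presum', res + c.getD m 0, mods ++ [m])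

-- B's main loop over the runs ('if j + 1 < nruns' = 'this is not the last run')
def loopB (k : Int) : List (Int × Int) → PySem.Dict Int Int → Int → Int → Int
  | [], _, _, res => res
  | (v, len) :: rest, c, presum, res =>
    let w := (List.range len.toNat).foldl (walkStep k v c) (presum, res, [])
    let c' := if rest = [] then c else w.2.2.foldl bump c
    loopB k rest c' w.1 w.2.1

def numGoodSubarrays_alt (nums : List Int) (k : Int) : Int :=
  loopB k (runsB nums) (PySem.Dict.empty.insert 0 1) 0 0

-- ===== PRECONDITION & SPEC =====

-- Pre_ excludes k = 0 with a nonempty list: there Python's '% 0' raises ZeroDivisionError (in A and in B).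
def Pre_numGoodSubarrays (nums : List Int) (k : Int) : Prop := nums = [] ∨ k ≠ 0
instance (nums : List Int) (k : Int) : Decidable (Pre_numGoodSubarrays nums k) := by
  unfold Pre_numGoodSubarrays; infer_instance

def pvWitness_numGoodSubarrays : List Int × Int := ([1, 1, 2, 2, 3], 3)

def Spec_numGoodSubarrays (nums : List Int) (k : Int) (out : Int) : Prop :=
  out = numGoodSubarrays_alt nums k
instance (nums : List Int) (k : Int) (out : Int) : Decidable (Spec_numGoodSubarrays nums k out) := by
  unfold Spec_numGoodSubarrays; infer_instance

-- ===== CLAIM (what is proved, stated in full; the proofs are below) =====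
def Claim_equal_numGoodSubarrays : Prop := ∀ (nums : List Int) (k : Int), Dom_numGoodSubarrays nums k → Pre_numGoodSubarrays nums k → Spec_numGoodSubarrays nums k (numGoodSubarrays nums k)

-- ===== LEMMAS AND PROOFS =====

-- canonical run-length encoding (proof-side mirror of B's run builder)
def runsAux (cur cnt : Int) : List Int → List (Int × Int)
  | [] => [(cur, cnt)]
  | x :: xs => if x = cur then runsAux cur (cnt + 1) xs else (cur, cnt) :: runsAux x 1 xs

-- the list of elements a run list denotes
def flat (rs : List (Int × Int)) : List Int := rs.flatMap (fun p => List.replicate p.2.toNat p.1)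

-- the remainders B records while walking a run of n copies of v starting from prefix sum p
def modsOf (k v p : Int) (n : Nat) : List Int :=
  (List.range n).map (fun t : Nat => PySem.Int.mod (p + ((t : Int) + 1) * v) k)

lemma build_eq (xs : List Int) : ∀ (runs : List (Int × Int)) (cur cnt : Int), 1 ≤ cnt →
    (if (xs.foldl runStepB (runs, cur, cnt)).2.2 ≠ 0
     then (xs.foldl runStepB (runs, cur, cnt)).1 ++
          [((xs.foldl runStepB (runs, cur, cnt)).2.1, (xs.foldl runStepB (runs, cur, cnt)).2.2)]
     else (xs.foldl runStepB (runs, cur, cnt)).1) = runs ++ runsAux cur cnt xs := by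
  induction xs with
  | nil =>
    intro runs cur cnt h
    simp only [List.foldl_nil, runsAux]
    rw [if_pos (by omega)]
  | cons x xs ih =>
    intro runs cur cnt h
    by_cases hx : x = cur
    · have hst : runStepB (runs, cur, cnt) x = (runs, cur, cnt + 1) := by
        have hcnt : cnt ≠ 0 := by omega
        simp [runStepB, hx, hcnt]
      simp only [List.foldl_cons, hst]
      rw [ih runs cur (cnt + 1) (by omega)]
      simp [runsAux, hx]
    · have hst : runStepB (runs, cur, cnt) x = (runs ++ [(cur, cnt)], x, 1) := by
        have hcnt : cnt ≠ 0 := by omega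
        simp [runStepB, hcnt, hx]
      simp only [List.foldl_cons, hst]
      rw [ih (runs ++ [(cur, cnt)]) x 1 le_rfl]
      simp [runsAux, hx]

lemma runsB_cons (x : Int) (xs : List Int) : runsB (x :: xs) = runsAux x 1 xs := by
  have h0 : runStepB ([], 0, 0) x = ([], x, 1) := by simp [runStepB]
  have h := build_eq xs [] x 1 le_rfl
  unfold runsB
  simp only [List.foldl_cons, h0]
  simpa using h

lemma flat_cons (v c : Int) (rs : List (Int × Int)) :
    flat ((v, c) :: rs) = List.replicate c.toNat v ++ flat rs := by
  simp [flat]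

lemma flat_runsAux (xs : List Int) : ∀ (cur cnt : Int), 0 ≤ cnt →
    flat (runsAux cur cnt xs) = List.replicate cnt.toNat cur ++ xs := by
  induction xs with
  | nil => intro cur cnt h; simp [runsAux, flat]
  | cons x xs ih =>
    intro cur cnt h
    by_cases hx : x = cur
    · rw [runsAux, if_pos hx, ih cur (cnt + 1) (by omega)]
      have h1 : (cnt + 1).toNat = cnt.toNat + 1 := by omega
      rw [h1, List.replicate_succ']
      simp [hx]
    · rw [runsAux, if_neg hx, flat_cons, ih x 1 (by omega)]
      simp

lemma pos_runsAux (xs : List Int) : ∀ (cur cnt : Int), 1 ≤ cnt →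
    ∀ p ∈ runsAux cur cnt xs, 1 ≤ p.2 := by
  induction xs with
  | nil =>
    intro cur cnt h p hp
    simp [runsAux] at hp
    simp [hp, h]
  | cons x xs ih =>
    intro cur cnt h p hp
    by_cases hx : x = cur
    · rw [runsAux, if_pos hx] at hp
      exact ih cur (cnt + 1) (by omega) p hp
    · rw [runsAux, if_neg hx] at hp
      rcases List.mem_cons.mp hp with h1 | h1
      · simp [h1, h]
      · exact ih x 1 le_rfl p h1

lemma head_runsAux (xs : List Int) : ∀ (cur cnt : Int),
    ∃ c rest, runsAux cur cnt xs = (cur, c) :: rest := by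
  induction xs with
  | nil => intro cur cnt; exact ⟨cnt, [], rfl⟩
  | cons x xs ih =>
    intro cur cnt
    by_cases hx : x = cur
    · rw [runsAux, if_pos hx]; exact ih cur (cnt + 1)
    · rw [runsAux, if_neg hx]; exact ⟨cnt, runsAux x 1 xs, rfl⟩

lemma chain_runsAux (xs : List Int) : ∀ (cur cnt : Int),
    List.IsChain (fun a b : Int × Int => a.1 ≠ b.1) (runsAux cur cnt xs) := by
  induction xs with
  | nil => intro cur cnt; simp [runsAux]
  | cons x xs ih =>
    intro cur cnt
    by_cases hx : x = cur
    · rw [runsAux, if_pos hx]; exact ih cur (cnt + 1)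
    · rw [runsAux, if_neg hx, List.isChain_cons]
      refine ⟨?_, ih x 1⟩
      intro y hy
      obtain ⟨c, rest, heq⟩ := head_runsAux xs x 1
      rw [heq] at hy
      simp at hy
      subst hy
      exact fun hc => hx hc.symm

lemma getD_bump (c : PySem.Dict Int Int) (key q : Int) :
    (bump c key).getD q 0 = c.getD q 0 + if q = key then 1 else 0 := by
  rw [bump, PySem.Dict.getD_insert]
  split_ifs with h
  · rw [h]
  · rw [add_zero]

lemma getD_foldl_bump (keys : List Int) : ∀ (c : PySem.Dict Int Int) (q : Int),
    (keys.foldl bump c).getD q 0 = c.getD q 0 + (keys.count q : Int) := by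
  induction keys with
  | nil => intro c q; simp
  | cons a keys ih =>
    intro c q
    rw [List.foldl_cons, ih, getD_bump, List.count_cons]
    by_cases h : q = a
    · subst h
      simp
      ring
    · have hba : (a == q) = false := beq_eq_false_iff_ne.mpr (fun e => h e.symm)
      simp [h, hba]

lemma flush_eq (k v : Int) (n : Nat) : ∀ (c : PySem.Dict Int Int) (s : Int),
    (List.range n).foldl (flushStep k v) (c, s)
      = (((List.range n).map (fun t : Nat => PySem.Int.mod (s - (t : Int) * v) k)).foldl bump c,
         s - (n : Int) * v) := by
  induction n with
  | zero => intro c s; simp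
  | succ n ih =>
    intro c s
    rw [List.range_succ, List.foldl_append, List.map_append, List.foldl_append, ih]
    simp [flushStep]
    ring

lemma modsOf_succ (k v p : Int) (n : Nat) :
    modsOf k v p (n + 1) = PySem.Int.mod (p + v) k :: modsOf k v (p + v) n := by
  unfold modsOf
  rw [List.range_succ_eq_map, List.map_cons, List.map_map]
  congr 1
  · norm_num
  · apply List.map_congr_left
    intro t _
    simp only [Function.comp]
    congr 1
    push_cast
    ring

lemma count_modsOf_eq (k v p : Int) (n : Nat) (q : Int) :
    (modsOf k v p n).count q
      = ((List.range n).map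
          (fun t : Nat => PySem.Int.mod ((p + (n : Int) * v) - (t : Int) * v) k)).count q := by
  have hrev : (List.range n).reverse = (List.range n).map (fun i => n - 1 - i) := by
    rw [List.range_eq_range', List.reverse_range', List.range_eq_range']
    simp
  have hmain : modsOf k v p n
      = ((List.range n).map
          (fun t : Nat => PySem.Int.mod ((p + (n : Int) * v) - (t : Int) * v) k)).reverse := by
    rw [← List.map_reverse, hrev, List.map_map]
    unfold modsOf
    apply List.map_congr_left
    intro t ht
    simp only [List.mem_range] at ht
    simp only [Function.comp]
    have h1 : ((n - 1 - t : Nat) : Int) = (n : Int) - 1 - t := by omega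
    congr 1
    rw [h1]
    ring
  rw [hmain, List.count_reverse]

-- A within a run makes exactly B's walk steps: counters untouched, equal res increments
lemma pairWalk (nums : List Int) (k v : Int) (cA cB : PySem.Dict Int Int)
    (hC : ∀ q, cB.getD q 0 = cA.getD q 0) (n : Nat) :
    ∀ (s : Nat) (p r ptr : Int) (mods : List Int),
      1 ≤ s → (∀ t : Nat, t < n → nums[s - 1 + t]? = some v) →
      (PySem.List.enumerate (List.replicate n v) (s : Int)).foldl (stepA nums k) (cA, p, r, ptr)
          = (cA, p + (n : Int) * v,
             ((List.range n).foldl (walkStep k v cB) (p, r, mods)).2.1, ptr)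
      ∧ (List.range n).foldl (walkStep k v cB) (p, r, mods)
          = (p + (n : Int) * v,
             ((List.range n).foldl (walkStep k v cB) (p, r, mods)).2.1,
             mods ++ modsOf k v p n) := by
  induction n with
  | zero => intro s p r ptr mods _ _; simp [modsOf]
  | succ n ih =>
    intro s p r ptr mods hs hpos
    have hx : nums[s - 1]? = some v := by simpa using hpos 0 (by omega)
    have hget : PySem.List.pyGetD nums ((s : Int) - 1) 0 = v := by
      have h1 : ((s : Int) - 1) = ((s - 1 : Nat) : Int) := by omega
      rw [h1, PySem.List.pyGetD_natCast]
      simp [List.getD, hx]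
    have hstep : stepA nums k (cA, p, r, ptr) ((s : Int), v)
        = (cA, p + v, r + cA.getD (PySem.Int.mod (p + v) k) 0, ptr) := by
      simp [stepA, hget]
    have eB : (List.range (n + 1)).foldl (walkStep k v cB) (p, r, mods)
        = (List.range n).foldl (walkStep k v cB)
            (p + v, r + cA.getD (PySem.Int.mod (p + v) k) 0,
             mods ++ [PySem.Int.mod (p + v) k]) := by
      rw [List.range_succ_eq_map, List.foldl_cons, List.foldl_map]
      rw [show walkStep k v cB (p, r, mods) 0
          = (p + v, r + cB.getD (PySem.Int.mod (p + v) k) 0, mods ++ [PySem.Int.mod (p + v) k])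
          from rfl, hC]
      exact PySem.List.foldl_congr_mem _ _ _ _ (fun acc x _ => rfl)
    have hcast : (s : Int) + 1 = ((s + 1 : Nat) : Int) := by push_cast; ring
    have ih' := ih (s + 1) (p + v) (r + cA.getD (PySem.Int.mod (p + v) k) 0) ptr
      (mods ++ [PySem.Int.mod (p + v) k]) (by omega)
      (fun t ht => by
        have h2 := hpos (t + 1) (by omega)
        have h3 : s - 1 + (t + 1) = s + 1 - 1 + t := by omega
        rwa [h3] at h2)
    rw [List.replicate_succ, PySem.List.enumerate_cons, List.foldl_cons, hstep, eB, hcast]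
    have h4 : p + v + (n : Int) * v = p + ((n + 1 : Nat) : Int) * v := by push_cast; ring
    refine ⟨?_, ?_⟩
    · rw [ih'.1, h4]
    · rw [ih'.2, h4, modsOf_succ, List.append_assoc]
      rfl

-- the pending-flush invariant between A's state and B's state at a run boundary
def PendInv (nums : List Int) (k : Int) (i0 : Nat) (pend : Option (Int × Int))
    (cA cB : PySem.Dict Int Int) (p ptr : Int) : Prop :=
  match pend with
  | none => i0 = 0 ∧ ptr = 0 ∧ ∀ q, cB.getD q 0 = cA.getD q 0
  | some (u, pl) =>
      1 ≤ pl ∧ 1 ≤ i0 ∧ ptr = (i0 : Int) - pl ∧ nums[i0 - 1]? = some u ∧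
      (∀ q, cB.getD q 0 =
        (((List.range pl.toNat).foldl (flushStep k u) (cA, p)).1).getD q 0)

lemma mainLoop (nums : List Int) (k : Int) :
    ∀ (rs : List (Int × Int)) (i0 : Nat) (pend : Option (Int × Int))
      (cA cB : PySem.Dict Int Int) (p r ptr : Int),
      nums.drop i0 = flat rs →
      (∀ q ∈ rs, 1 ≤ q.2) →
      List.IsChain (fun a b : Int × Int => a.1 ≠ b.1) rs →
      (∀ w ∈ rs.head?, ∀ up ∈ pend, w.1 ≠ up.1) →
      PendInv nums k i0 pend cA cB p ptr →
      ((PySem.List.enumerate (nums.drop i0) (i0 : Int)).foldl (stepA nums k)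
          (cA, p, r, ptr)).2.2.1
        = loopB k rs cB p r := by
  intro rs
  induction rs with
  | nil =>
    intro i0 pend cA cB p r ptr h1 _ _ _ _
    rw [h1]
    simp [flat, loopB]
  | cons vl rest ih =>
    obtain ⟨v, L⟩ := vl
    intro i0 pend cA cB p r ptr h1 hpos hchain hhead hinv
    have hL : 1 ≤ L := hpos (v, L) List.mem_cons_self
    have hn : 1 ≤ L.toNat := by omega
    obtain ⟨m, hm⟩ : ∃ m, L.toNat = m + 1 := ⟨L.toNat - 1, by omega⟩
    rw [flat_cons, hm] at h1
    have hpos_t : ∀ t : Nat, t < m + 1 → nums[i0 + t]? = some v := by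
      intro t ht
      rw [← List.getElem?_drop, h1, List.getElem?_append_left (by simp [ht]),
        List.getElem?_replicate, if_pos ht]
    have hfirst : ∃ c1 : PySem.Dict Int Int,
        stepA nums k (cA, p, r, ptr) ((i0 : Int), v)
          = (c1, p + v, r + c1.getD (PySem.Int.mod (p + v) k) 0, (i0 : Int))
        ∧ (∀ q, cB.getD q 0 = c1.getD q 0) := by
      match pend, hinv with
      | none, ⟨hi0, hptr, hCB⟩ =>
        refine ⟨cA, ?_, hCB⟩
        rw [hi0, hptr]
        simp [stepA]
      | some (u, pl), ⟨hpl, hi0, hptr, hprevu, hCB⟩ =>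
        have hvu : v ≠ u := hhead (v, L) rfl (u, pl) rfl
        have hget : PySem.List.pyGetD nums ((i0 : Int) - 1) 0 = u := by
          have hcast : ((i0 : Int) - 1) = ((i0 - 1 : Nat) : Int) := by omega
          rw [hcast, PySem.List.pyGetD_natCast]
          simp [List.getD, hprevu]
        refine ⟨(((List.range pl.toNat).foldl (flushStep k u) (cA, p)).1), ?_, hCB⟩
        have hcnt : ((i0 : Int) - ptr).toNat = pl.toNat := by omega
        simp [stepA, hget, hvu, hcnt, show i0 ≠ 0 by omega]
    obtain ⟨c1, hstep, hC1⟩ := hfirst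
    have eB : (List.range (m + 1)).foldl (walkStep k v cB) (p, r, [])
        = (List.range m).foldl (walkStep k v cB)
            (p + v, r + c1.getD (PySem.Int.mod (p + v) k) 0, [PySem.Int.mod (p + v) k]) := by
      rw [List.range_succ_eq_map, List.foldl_cons, List.foldl_map]
      rw [show walkStep k v cB (p, r, []) 0
          = (p + v, r + cB.getD (PySem.Int.mod (p + v) k) 0, [PySem.Int.mod (p + v) k])
          from rfl, hC1]
      exact PySem.List.foldl_congr_mem _ _ _ _ (fun acc x _ => rfl)
    have hcast1 : (i0 : Int) + 1 = ((i0 + 1 : Nat) : Int) := by push_cast; ring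
    have hPW := pairWalk nums k v c1 cB hC1 m (i0 + 1) (p + v)
      (r + c1.getD (PySem.Int.mod (p + v) k) 0) (i0 : Int) [PySem.Int.mod (p + v) k]
      (by omega)
      (fun t ht => by
        have h2 := hpos_t t (by omega)
        have h3 : i0 + 1 - 1 + t = i0 + t := by omega
        rwa [h3])
    have hP : p + v + (m : Int) * v = p + ((m + 1 : Nat) : Int) * v := by push_cast; ring
    obtain ⟨w2, hwEq⟩ : ∃ w2,
        (List.range m).foldl (walkStep k v cB)
            (p + v, r + c1.getD (PySem.Int.mod (p + v) k) 0, [PySem.Int.mod (p + v) k])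
          = (p + v + (m : Int) * v, w2, modsOf k v p (m + 1)) :=
      ⟨_, by rw [modsOf_succ]; exact hPW.2⟩
    have hPW1 : (PySem.List.enumerate (List.replicate m v) ((i0 + 1 : Nat) : Int)).foldl
          (stepA nums k) (c1, p + v, r + c1.getD (PySem.Int.mod (p + v) k) 0, (i0 : Int))
        = (c1, p + v + (m : Int) * v, w2, (i0 : Int)) := by
      rw [hPW.1, hwEq]
    rw [h1, PySem.List.enumerate_append, List.foldl_append, List.replicate_succ,
      PySem.List.enumerate_cons, List.foldl_cons, hstep, hcast1, hPW1]
    have hloop : loopB k ((v, L) :: rest) cB p r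
        = loopB k rest (if rest = [] then cB else (modsOf k v p (m + 1)).foldl bump cB)
            (p + v + (m : Int) * v) w2 := by
      simp only [loopB]
      rw [hm, eB, hwEq]
    rw [hloop]
    rcases eq_or_ne rest [] with hrest | hrest
    · subst hrest
      rw [show flat ([] : List (Int × Int)) = [] from rfl]
      simp [loopB]
    · have hdrop : nums.drop (i0 + (m + 1)) = flat rest := by
        have hdd : nums.drop (i0 + (m + 1)) = (nums.drop i0).drop (m + 1) := by
          rw [List.drop_drop]
        rw [hdd, h1]
        simp
      have hstart : (i0 : Int) + ((v :: List.replicate m v).length : Int)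
          = ((i0 + (m + 1) : Nat) : Int) := by simp
      have hchain' := (List.isChain_cons.mp hchain).2
      have hheadrest : ∀ w' ∈ rest.head?, ∀ up ∈ some (v, L), w'.1 ≠ up.1 := by
        intro w' hw' up hup
        have hne := (List.isChain_cons.mp hchain).1 w' hw'
        cases hup
        exact hne.symm
      have hinv' : PendInv nums k (i0 + (m + 1)) (some (v, L)) c1
          ((modsOf k v p (m + 1)).foldl bump cB) (p + v + (m : Int) * v) (i0 : Int) := by
        refine ⟨hL, by omega, by push_cast; omega, ?_, ?_⟩
        · have h2 := hpos_t m (by omega)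
          have h3 : i0 + (m + 1) - 1 = i0 + m := by omega
          rwa [h3]
        · intro q
          rw [getD_foldl_bump, hC1, hm,
            flush_eq k v (m + 1) c1 (p + v + (m : Int) * v), getD_foldl_bump]
          congr 1
          rw [hP, count_modsOf_eq]
      have hIH := ih (i0 + (m + 1)) (some (v, L)) c1 ((modsOf k v p (m + 1)).foldl bump cB)
        (p + v + (m : Int) * v) w2 (i0 : Int)
        hdrop (fun q hq => hpos q (List.mem_cons_of_mem _ hq)) hchain' hheadrest hinv'
      rw [if_neg hrest, hstart, ← hdrop]
      exact hIH

-- ===== VERDICT (by name: the statement is the Claim_ definition above) =====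
theorem numGoodSubarrays_spec : Claim_equal_numGoodSubarrays := by
  intro nums k _ _
  unfold Spec_numGoodSubarrays
  cases nums with
  | nil => rfl
  | cons x xs =>
    unfold numGoodSubarrays numGoodSubarrays_alt
    rw [runsB_cons]
    have h := mainLoop (x :: xs) k (runsAux x 1 xs) 0 none
      (PySem.Dict.empty.insert 0 1) (PySem.Dict.empty.insert 0 1) 0 0 0
      (by rw [flat_runsAux xs x 1 (by omega)]; simp)
      (pos_runsAux xs x 1 le_rfl)
      (chain_runsAux xs x 1)
      (by intro w _ up hup; simp at hup)
      ⟨rfl, rfl, fun q => rfl⟩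
    simpa using h
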